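-- pv_equiv track=rewrite | github.com/ZanBajuk/AdventOfCode | Dan4.py | succ2_test
-- ===== SOURCE A (Python) =====
-- def succ2_test(n):
--     last = str(n)[0]
--     num_of_sames = 0
--     for i in str(n)[1:]:
--         if i == last:
--             num_of_sames += 1
--         elif num_of_sames == 1:
--             return True
--         else:
--             last = i
--             num_of_sames = 0
--     if num_of_sames == 1:
--         return True
--     return False
-- ===== SOURCE B (Python) =====
-- def succ2_test(n):
--     s = str(n)
--     i = 0
--     while i < len(s):
--         j = i
--         while j < len(s) and s[j] == s[i]:
--             j += 1
--         if j - i == 2: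
--             return True
--         i = j
--     return False
-- ===== Notes on version B (the rewrite author's own statement) =====
-- stated objective: alternative
-- what changed: Replaces A's last/num_of_sames state-machine counter with a two-pointer run-boundary scan: each maximal run of equal characters of str(n) is delimited directly and its length tested for == 2.
import Mathlib
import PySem

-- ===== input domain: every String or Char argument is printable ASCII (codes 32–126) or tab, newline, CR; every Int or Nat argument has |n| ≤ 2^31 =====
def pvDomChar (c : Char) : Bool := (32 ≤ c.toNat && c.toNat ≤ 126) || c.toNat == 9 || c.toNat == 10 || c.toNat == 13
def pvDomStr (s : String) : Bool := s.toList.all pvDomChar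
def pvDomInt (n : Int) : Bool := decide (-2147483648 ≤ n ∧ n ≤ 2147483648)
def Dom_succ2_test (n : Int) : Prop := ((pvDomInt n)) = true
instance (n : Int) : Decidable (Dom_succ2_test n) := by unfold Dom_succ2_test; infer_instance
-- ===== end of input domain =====

-- B replaces A's last/num_of_sames counter state machine with a two-pointer scan over
-- the maximal runs of equal characters of str(n), testing each run length for == 2 (alternative decomposition).


-- ===== PORT A =====
-- the for-loop over str(n)[1:], with state (last, num_of_sames) and the early return
def succ2_loopA (last : Char) (cnt : Int) : List Char → Bool
  | [] => cnt == 1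
  | i :: rest =>
      if i == last then succ2_loopA last (cnt + 1) rest
      else if cnt == 1 then true
      else succ2_loopA i 0 rest

def succ2_test (n : Int) : Bool :=
  match (PySem.Int.toStr n).toList with
  | [] => false          -- unreachable: str(n) is never empty
  | c :: rest => succ2_loopA c 0 rest

-- ===== PORT B =====
-- the outer while-loop of Source B: delimit the maximal run starting at position i
-- (the inner 'while s[j] == s[i]' scan is takeWhile/dropWhile), test its length == 2
def succ2_scanB : List Char → Bool
  | [] => false
  | c :: cs =>
      if (cs.takeWhile (· == c)).length + 1 == 2 then true
      else succ2_scanB (cs.dropWhile (· == c))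
termination_by l => l.length
decreasing_by
  simp only [List.length_cons]
  exact Nat.lt_succ_of_le (List.length_dropWhile_le _ _)

def succ2_test_alt (n : Int) : Bool :=
  succ2_scanB (PySem.Int.toStr n).toList

-- ===== PRECONDITION & SPEC =====
def Spec_succ2_test (n : Int) (out : Bool) : Prop := out = succ2_test_alt n
instance (n : Int) (out : Bool) : Decidable (Spec_succ2_test n out) := by unfold Spec_succ2_test; infer_instance

-- ===== CLAIM (what is proved, stated in full; the proofs are below) =====
def Claim_equal_succ2_test : Prop := ∀ (n : Int), Dom_succ2_test n → Spec_succ2_test n (succ2_test n)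

-- ===== LEMMAS AND PROOFS =====
-- A's loop with current char c and counter k equals: "the current run (k+1 chars so far plus
-- the sames still ahead) closes at total k+1+takeWhile; it fires iff that is 2 (k+takeWhile=1),
-- otherwise B's scan continues on the rest".
theorem succ2_loop_eq (l : List Char) : ∀ (c : Char) (k : Int),
    succ2_loopA c k l =
      ((decide (k + ((l.takeWhile (· == c)).length : Int) = 1)) ||
        succ2_scanB (l.dropWhile (· == c))) := by
  induction l with
  | nil =>
      intro c k
      simp only [succ2_loopA, List.takeWhile_nil, List.dropWhile_nil, List.length_nil,
        succ2_scanB, Bool.or_false]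
      by_cases hk : k = 1 <;> simp [hk]
  | cons i t ih =>
      intro c k
      by_cases h : i = c
      · subst h
        simp only [succ2_loopA, List.takeWhile_cons, List.dropWhile_cons, beq_self_eq_true,
          if_true, List.length_cons]
        rw [ih]
        congr 1
        simp only [decide_eq_decide]
        push_cast
        omega
      · have hne : (i == c) = false := by simp [h]
        simp only [succ2_loopA, List.takeWhile_cons, List.dropWhile_cons, hne]
        by_cases hk : k = 1
        · subst hk; simp
        · have : (k == 1) = false := by simp [hk]
          rw [this]
          simp only [Bool.false_eq_true, if_false]
          rw [ih i 0]
          have hkf : decide (k + ((([] : List Char).length : Nat) : Int) = 1) = false := by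
            simp [hk]
          rw [hkf]
          simp only [Bool.false_or, succ2_scanB]
          by_cases h2 : (t.takeWhile (· == i)).length = 1 <;> simp [h2]

-- ===== VERDICT (by name: the statement is the Claim_ definition above) =====
theorem succ2_test_spec : Claim_equal_succ2_test := by
  intro n _
  unfold Spec_succ2_test succ2_test succ2_test_alt
  cases hs : (PySem.Int.toStr n).toList with
  | nil => simp [succ2_scanB]
  | cons c rest =>
      change succ2_loopA c 0 rest = succ2_scanB (c :: rest)
      rw [succ2_loop_eq]
      simp only [succ2_scanB, Int.zero_add]
      by_cases h2 : (rest.takeWhile (· == c)).length = 1 <;> simp [h2]
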